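-- pv_equiv track=rewrite | github.com/khangbdd/Data-processing-CLI | encoding_handler.py | _ordinalEncoding
-- ===== SOURCE A (Python) =====
-- def _ordinalEncoding(featureData):
--     dictionaryOfType = {}
--     count = 0
--     encodedList = [0]*len(featureData)
--     for index, value in enumerate(featureData):
--         existData = dictionaryOfType.get(value, -1)
--         if existData == -1:
--             dictionaryOfType[value] = count
--             encodedList[index] = count
--             count += 1
--         else:
--             encodedList[index] = existData
--     return encodedList
-- ===== SOURCE B (Python) =====
-- def _ordinalEncoding(featureData):
--     # Counting formulation: the code of a value is the number of distinct
--     # values that occur strictly before its first occurrence.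
--     return [len(set(featureData[:featureData.index(v)])) for v in featureData]
-- ===== Notes on version B (the rewrite author's own statement) =====
-- stated objective: alternative
-- what changed: B drops A's incrementally built value-to-code dictionary and counter entirely: it computes each code directly from a counting characterisation (code of v = number of distinct values strictly before v's first occurrence), via index/slice/set per element.
import Mathlib
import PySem

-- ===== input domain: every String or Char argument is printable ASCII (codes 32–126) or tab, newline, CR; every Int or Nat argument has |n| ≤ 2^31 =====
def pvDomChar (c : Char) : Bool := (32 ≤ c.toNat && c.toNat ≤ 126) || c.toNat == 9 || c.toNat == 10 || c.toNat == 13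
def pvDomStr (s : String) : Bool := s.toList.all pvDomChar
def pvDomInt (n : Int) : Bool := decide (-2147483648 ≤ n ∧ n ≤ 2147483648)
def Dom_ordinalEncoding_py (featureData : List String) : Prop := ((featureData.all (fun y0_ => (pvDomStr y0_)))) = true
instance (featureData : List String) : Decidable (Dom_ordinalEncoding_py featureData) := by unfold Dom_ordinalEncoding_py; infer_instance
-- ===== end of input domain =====

-- B replaces A's incremental dict+counter with a direct counting characterisation:
-- code of v = number of distinct values strictly before v's first occurrence. Same result.

-- ===== PORT A =====
-- the body of A's for-loop, one iteration: state (dictionaryOfType, count, encodedList), item (index, value)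
def pvStepA (st : PySem.Dict String Int × Int × List Int) (p : Int × String) :
    PySem.Dict String Int × Int × List Int :=
  let d := st.1
  let count := st.2.1
  let enc := st.2.2
  let existData := d.getD p.2 (-1)
  if existData = -1 then
    (d.insert p.2 count, count + 1, PySem.List.pySetD enc p.1 count)
  else
    (d, count, PySem.List.pySetD enc p.1 existData)

-- literal port of A: fused loop over enumerate, explicit counter, output preallocated and written by index
def ordinalEncoding_py (featureData : List String) : List Int :=
  ((PySem.List.enumerate featureData 0).foldl pvStepA
    (PySem.Dict.empty, 0, List.replicate featureData.length 0)).2.2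

-- ===== PORT B =====
-- literal port of Source B's comprehension [len(set(featureData[:featureData.index(v)])) for v in featureData].
-- featureData.index(v) is ported as (index? featureData v).getD 0 — exact because v ∈ featureData,
-- so index? is always some (Python's ValueError is unreachable).
def ordinalEncoding_py_alt (featureData : List String) : List Int :=
  featureData.map (fun v =>
    ((PySem.Set.ofList
        (PySem.List.slice featureData none
          (some (((PySem.List.index? featureData v).getD 0 : Nat) : Int)))).length : Int))

-- ===== PRECONDITION & SPEC =====
def Spec_ordinalEncoding_py (featureData : List String) (out : List Int) : Prop := out = ordinalEncoding_py_alt featureData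
instance (featureData : List String) (out : List Int) : Decidable (Spec_ordinalEncoding_py featureData out) := by unfold Spec_ordinalEncoding_py; infer_instance

-- ===== CLAIM (what is proved, stated in full; the proofs are below) =====
def Claim_equal_ordinalEncoding_py : Prop := ∀ (featureData : List String), Dom_ordinalEncoding_py featureData → Spec_ordinalEncoding_py featureData (ordinalEncoding_py featureData)

-- ===== LEMMAS AND PROOFS =====

-- proof-side bridge: the first-occurrence table A builds, as a standalone fold (setdefault v (size))
def pvStepB (d : PySem.Dict String Int) (v : String) : PySem.Dict String Int :=
  d.setdefault v (d.size : Int)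

-- proof-side: B's per-element value, written over List.take
def pvCode (l : List String) (v : String) : Int :=
  ((PySem.Set.ofList (l.take ((PySem.List.index? l v).getD 0))).length : Int)

-- writing at the length of the prefix replaces the head of the suffix
lemma pvSetAppendLen (pre rest : List Int) (x y : Int) :
    (pre ++ y :: rest).set pre.length x = pre ++ x :: rest := by
  induction pre with
  | nil => rfl
  | cons a t ih => simp [ih]

-- setdefault never changes an existing binding
lemma pvFoldPreserve (l : List String) (d : PySem.Dict String Int) (k : String) (x : Int)
    (h : d.get? k = some x) : (l.foldl pvStepB d).get? k = some x := by
  induction l generalizing d with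
  | nil => simpa using h
  | cons v vs ih =>
    simp only [List.foldl_cons]
    apply ih
    by_cases hc : d.contains v = true
    · rw [pvStepB, PySem.Dict.setdefault_of_contains d _ hc]; exact h
    · rw [pvStepB, PySem.Dict.setdefault_of_not_contains d _ (by simpa using hc)]
      by_cases hk : k = v
      · subst hk
        rw [PySem.Dict.contains_eq_isSome_get?, h] at hc
        simp at hc
      · rw [PySem.Dict.get?_insert_of_ne d _ hk]; exact h

-- invariant for A-side loop: running A's fused loop from any dict state with nonnegative codes
-- and count = d.size fills the suffix of the output with lookups in the FINAL table
lemma pvLoopA (l : List String) (d : PySem.Dict String Int) (pre : List Int)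
    (hval : ∀ k x, d.get? k = some x → 0 ≤ x) :
    ((PySem.List.enumerate l (pre.length : Int)).foldl pvStepA
      (d, (d.size : Int), pre ++ List.replicate l.length 0)).2.2
    = pre ++ l.map (fun v => (l.foldl pvStepB d).getD v 0) := by
  induction l generalizing d pre with
  | nil => simp [PySem.List.enumerate_nil]
  | cons v vs ih =>
    rw [PySem.List.enumerate_cons, List.foldl_cons]
    by_cases hc : d.contains v = true
    · cases hopt : d.get? v with
      | none =>
        rw [PySem.Dict.contains_eq_isSome_get?, hopt] at hc
        simp at hc
      | some x =>
        have hxval : 0 ≤ x := hval v x hopt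
        have hgd : d.getD v (-1) = x := PySem.Dict.getD_of_get?_eq_some d (-1) hopt
        have hstep : pvStepA (d, (d.size : Int), pre ++ List.replicate (v :: vs).length 0)
            ((pre.length : Int), v)
            = (d, (d.size : Int), (pre ++ [x]) ++ List.replicate vs.length 0) := by
          have hne : ¬ (d.getD v (-1) = -1) := by rw [hgd]; omega
          simp only [pvStepA, hne, if_false]
          rw [hgd, PySem.List.pySetD_natCast]
          simp only [List.length_cons, List.replicate_succ]
          rw [pvSetAppendLen]
          simp
        have hlen : ((pre ++ [x]).length : Int) = (pre.length : Int) + 1 := by simp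
        rw [hstep, ← hlen, ih d (pre ++ [x]) hval]
        have hB : pvStepB d v = d := by
          rw [pvStepB, PySem.Dict.setdefault_of_contains d _ hc]
        have hlook : (vs.foldl pvStepB d).getD v 0 = x := by
          rw [PySem.Dict.getD_eq_get?_getD, pvFoldPreserve vs d v x hopt]; rfl
        simp only [List.foldl_cons, List.map_cons, hB, hlook]
        simp
    · have hc' : d.contains v = false := by simpa using hc
      have hgd : d.getD v (-1) = -1 := PySem.Dict.getD_of_not_contains d (-1) hc'
      have hsz : ((d.insert v (d.size : Int)).size : Int) = (d.size : Int) + 1 := by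
        rw [PySem.Dict.size_insert]
        simp [hc']
      have hstep : pvStepA (d, (d.size : Int), pre ++ List.replicate (v :: vs).length 0)
          ((pre.length : Int), v)
          = (d.insert v (d.size : Int), ((d.insert v (d.size : Int)).size : Int),
             (pre ++ [(d.size : Int)]) ++ List.replicate vs.length 0) := by
        simp only [pvStepA, hgd, if_pos]
        rw [hsz, PySem.List.pySetD_natCast]
        simp only [List.length_cons, List.replicate_succ]
        rw [pvSetAppendLen]
        simp
      have hval' : ∀ k x, (d.insert v (d.size : Int)).get? k = some x → 0 ≤ x := by
        intro k x hk
        by_cases hkv : k = v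
        · subst hkv
          rw [PySem.Dict.get?_insert_self] at hk
          cases hk; positivity
        · rw [PySem.Dict.get?_insert_of_ne d _ hkv] at hk
          exact hval k x hk
      have hlen : ((pre ++ [(d.size : Int)]).length : Int) = (pre.length : Int) + 1 := by simp
      rw [hstep, ← hlen, ih (d.insert v (d.size : Int)) (pre ++ [(d.size : Int)]) hval']
      have hB : pvStepB d v = d.insert v (d.size : Int) := by
        rw [pvStepB, PySem.Dict.setdefault_of_not_contains d _ hc']
      have hlook : (vs.foldl pvStepB (d.insert v (d.size : Int))).getD v 0 = (d.size : Int) := by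
        rw [PySem.Dict.getD_eq_get?_getD,
          pvFoldPreserve vs _ v _ (PySem.Dict.get?_insert_self d v _)]
        rfl
      simp only [List.foldl_cons, List.map_cons, hB, hlook]
      simp

-- the table fold characterised: its bindings are exactly pvCode, its size the distinct count
lemma pvDictInv (p : List String) :
    (∀ v, (p.foldl pvStepB PySem.Dict.empty).get? v
        = if v ∈ p then some (pvCode p v) else none) ∧
    (p.foldl pvStepB PySem.Dict.empty).size = (PySem.Set.ofList p).length := by
  induction p using List.reverseRecOn with
  | nil =>
    refine ⟨fun v => ?_, ?_⟩ <;> simp [PySem.Dict.get?_empty, PySem.Dict.size_empty]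
  | append_singleton p a ih =>
    obtain ⟨hget, hsz⟩ := ih
    rw [List.foldl_append, List.foldl_cons, List.foldl_nil]
    have hofl : PySem.Set.ofList (p ++ [a]) = PySem.Set.add (PySem.Set.ofList p) a := by
      rw [PySem.Set.ofList_eq_foldl, PySem.Set.ofList_eq_foldl, List.foldl_append]; rfl
    -- pvCode is stable under appending for values already present
    have hcode : ∀ v, v ∈ p → pvCode (p ++ [a]) v = pvCode p v := by
      intro v hv
      have hidx : PySem.List.index? (p ++ [a]) v = PySem.List.index? p v :=
        PySem.List.index?_append_of_mem [a] hv
      obtain ⟨k, hk, hkle⟩ : ∃ k, PySem.List.index? p v = some k ∧ k ≤ p.length := by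
        cases hk : PySem.List.index? p v with
        | none => exact absurd ((PySem.List.index?_eq_none_iff _ _).1 hk) (by simpa using hv)
        | some k =>
          refine ⟨k, rfl, ?_⟩
          obtain ⟨pre, suf, hps, hlen, -⟩ := (PySem.List.index?_eq_some_iff _ _ _).1 hk
          subst hps; simp [← hlen]
      rw [pvCode, pvCode, hidx, hk]
      simp only [Option.getD_some]
      rw [List.take_append_of_le_length hkle]
    by_cases ha : a ∈ p
    · have hc : (p.foldl pvStepB PySem.Dict.empty).contains a = true := by
        rw [PySem.Dict.contains_eq_isSome_get?, hget a, if_pos ha]; rfl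
      rw [pvStepB, PySem.Dict.setdefault_of_contains _ _ hc]
      refine ⟨fun v => ?_, ?_⟩
      · by_cases hv : v ∈ p
        · rw [hget v, if_pos hv, if_pos (by simp [hv]), hcode v hv]
        · have : ¬ v ∈ p ++ [a] := by
            simp only [List.mem_append, List.mem_singleton]
            rintro (h | rfl) <;> [exact hv h; exact hv ha]
          rw [hget v, if_neg hv, if_neg this]
      · rw [hsz, hofl]
        have : a ∈ PySem.Set.ofList p := (PySem.Set.mem_ofList _ _).2 ha
        simp [PySem.Set.add, this]
    · have hc : (p.foldl pvStepB PySem.Dict.empty).contains a = false := by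
        rw [PySem.Dict.contains_eq_isSome_get?, hget a, if_neg ha]; rfl
      rw [pvStepB, PySem.Dict.setdefault_of_not_contains _ _ hc]
      refine ⟨fun v => ?_, ?_⟩
      · by_cases hva : v = a
        · subst hva
          rw [PySem.Dict.get?_insert_self, if_pos (by simp)]
          have hidx : PySem.List.index? (p ++ [v]) v = some p.length :=
            PySem.List.index?_append_singleton_self p v (by simpa using ha)
          rw [pvCode, hidx]
          simp only [Option.getD_some, List.take_left]
          rw [hsz]
        · rw [PySem.Dict.get?_insert_of_ne _ _ hva]
          by_cases hv : v ∈ p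
          · rw [hget v, if_pos hv, if_pos (by simp [hv]), hcode v hv]
          · have : ¬ v ∈ p ++ [a] := by
              simp only [List.mem_append, List.mem_singleton]
              rintro (h | rfl) <;> [exact hv h; exact hva rfl]
            rw [hget v, if_neg hv, if_neg this]
      · rw [PySem.Dict.size_insert, hc, hofl]
        have : ¬ a ∈ PySem.Set.ofList p := fun h => ha ((PySem.Set.mem_ofList _ _).1 h)
        simp [PySem.Set.add, this, hsz]

-- ===== VERDICT (by name: the statement is the Claim_ definition above) =====
theorem ordinalEncoding_py_spec : Claim_equal_ordinalEncoding_py := by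
  intro l _
  unfold Spec_ordinalEncoding_py ordinalEncoding_py ordinalEncoding_py_alt
  have h := pvLoopA l PySem.Dict.empty [] (by intro k x hk; simp [PySem.Dict.get?_empty] at hk)
  simp only [List.length_nil, Int.natCast_zero, PySem.Dict.size_empty, List.nil_append] at h
  rw [h]
  apply List.map_congr_left
  intro v hv
  have hinv := (pvDictInv l).1 v
  rw [if_pos hv] at hinv
  rw [PySem.Dict.getD_eq_get?_getD, hinv]
  show pvCode l v = _
  rw [pvCode, PySem.List.slice_to_natCast]
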